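-- pv_equiv track=rewrite | github.com/turkiewicz479/Zadnia_air | skeletons/basics-1/lists.py | element_xor
-- ===== SOURCE A (Python) =====
-- from typing import List, Any, Optional
--
-- def element_xor(lst: List[Any], e1: Any, e2: Any) -> bool:
--     """Sprawdź, czy obiekt `e1` znajduje się na liście `lst` ORAZ obiekt `e2`
--     NIE znajduje się na liście `lst`.
--
--     Przykład: elem_xor([1, 2], 1, 3) = True, is_elem_in_list([1, 2], 1, 2) = False
--
--     :param lst: lista
--     :param e1: element, którego występowanie jest sprawdzane
--     :param e2: element, którego NIEwystępowanie jest sprawdzane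
--     :return: True jeśli obiekt `e1` znajduje się na liście `lst` ORAZ obiekt `e2`
--         NIE znajduje się na liście `lst`, inaczej False
--     """
--
--     for a in lst:
--         if e1==a:
--             for b in lst:
--                 if e2==b:
--                     return False
--             return True
--     return False
--
--
--     pass
-- ===== SOURCE B (Python) =====
-- def element_xor(lst, e1, e2):
--     # Single fused pass: abort immediately when the forbidden element e2 is
--     # seen; remember whether e1 has been seen.
--     found1 = False
--     for x in lst:
--         if x == e2:
--             return False
--         if x == e1:
--             found1 = True
--     return found1
-- ===== Notes on version B (the rewrite author's own statement) =====
-- stated objective: alternative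
-- what changed: Replaced A's nested find-e1-then-full-rescan-for-e2 loops by one fused single pass with an accumulator: it early-exits False the moment e2 is seen and otherwise accumulates whether e1 occurred.
import Mathlib
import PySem

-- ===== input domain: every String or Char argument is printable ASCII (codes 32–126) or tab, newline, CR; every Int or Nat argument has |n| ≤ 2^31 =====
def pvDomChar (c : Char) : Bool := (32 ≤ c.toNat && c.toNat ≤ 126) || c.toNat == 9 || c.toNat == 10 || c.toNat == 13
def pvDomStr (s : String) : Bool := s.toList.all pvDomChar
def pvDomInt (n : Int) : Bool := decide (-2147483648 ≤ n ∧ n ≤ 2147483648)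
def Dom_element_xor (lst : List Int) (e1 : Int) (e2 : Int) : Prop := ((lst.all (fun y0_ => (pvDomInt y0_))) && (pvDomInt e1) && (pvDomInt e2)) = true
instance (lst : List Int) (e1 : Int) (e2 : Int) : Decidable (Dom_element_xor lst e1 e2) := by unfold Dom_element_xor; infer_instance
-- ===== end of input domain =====

-- B replaces A's nested find-e1-then-rescan-for-e2 loops by one fused single pass
-- (early exit on e2, accumulator for e1) — alternative decomposition.

-- ===== PORT A =====
-- inner 'for b in lst: if e2==b: return False' then 'return True'
def element_xor_inner (e2 : Int) : List Int → Bool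
  | [] => true
  | b :: rest => if e2 == b then false else element_xor_inner e2 rest

-- outer 'for a in lst: if e1==a: <inner over the FULL lst>' then 'return False'
def element_xor_outer (full : List Int) (e1 : Int) (e2 : Int) : List Int → Bool
  | [] => false
  | a :: rest => if e1 == a then element_xor_inner e2 full else element_xor_outer full e1 e2 rest

def element_xor (lst : List Int) (e1 : Int) (e2 : Int) : Bool :=
  element_xor_outer lst e1 e2 lst

-- ===== PORT B =====
-- 'for x in lst: if x==e2: return False; if x==e1: found1=True' then 'return found1'
def element_xor_alt_go (e1 e2 : Int) (found1 : Bool) : List Int → Bool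
  | [] => found1
  | x :: rest =>
      if x == e2 then false
      else if x == e1 then element_xor_alt_go e1 e2 true rest
      else element_xor_alt_go e1 e2 found1 rest

def element_xor_alt (lst : List Int) (e1 : Int) (e2 : Int) : Bool :=
  element_xor_alt_go e1 e2 false lst

-- ===== PRECONDITION & SPEC =====
def Spec_element_xor (lst : List Int) (e1 : Int) (e2 : Int) (out : Bool) : Prop := out = element_xor_alt lst e1 e2
instance (lst : List Int) (e1 : Int) (e2 : Int) (out : Bool) : Decidable (Spec_element_xor lst e1 e2 out) := by unfold Spec_element_xor; infer_instance

-- ===== CLAIM =====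
def Claim_equal_element_xor : Prop := ∀ (lst : List Int) (e1 : Int) (e2 : Int), Dom_element_xor lst e1 e2 → Spec_element_xor lst e1 e2 (element_xor lst e1 e2)

-- ===== LEMMAS AND PROOFS =====
theorem element_xor_inner_eq_all (e2 : Int) (l : List Int) :
    element_xor_inner e2 l = l.all (fun x => !(x == e2)) := by
  induction l with
  | nil => rfl
  | cons b rest ih =>
    simp only [element_xor_inner, List.all_cons, ih]
    by_cases hb : e2 = b
    · simp [hb]
    · simp [hb, Ne.symm hb]

theorem element_xor_outer_eq (full : List Int) (e1 e2 : Int) (l : List Int) :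
    element_xor_outer full e1 e2 l
      = (l.any (fun x => x == e1) && element_xor_inner e2 full) := by
  induction l with
  | nil => rfl
  | cons a rest ih =>
    simp only [element_xor_outer, List.any_cons, ih]
    by_cases hb : e1 = a
    · simp [hb]
    · have h : (a == e1) = false := by simp [Ne.symm hb]
      simp [hb, h]

theorem element_xor_alt_go_eq (e1 e2 : Int) (acc : Bool) (l : List Int) :
    element_xor_alt_go e1 e2 acc l
      = ((acc || l.any (fun x => x == e1)) && l.all (fun x => !(x == e2))) := by
  induction l generalizing acc with
  | nil => simp [element_xor_alt_go]
  | cons x rest ih =>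
    simp only [element_xor_alt_go, List.any_cons, List.all_cons]
    by_cases h2 : x = e2
    · simp [h2]
    · have a2 : (x == e2) = false := by simp [h2]
      by_cases h1 : x = e1
      · subst h1
        simp [a2, ih]
      · have a1 : (x == e1) = false := by simp [h1]
        simp [a1, a2, ih]

-- ===== VERDICT =====
theorem element_xor_spec : Claim_equal_element_xor := by
  intro lst e1 e2 _
  unfold Spec_element_xor element_xor element_xor_alt
  rw [element_xor_outer_eq, element_xor_inner_eq_all, element_xor_alt_go_eq]
  simp
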